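-- pv_equiv track=rewrite | github.com/TelevisionNinja/pyLib | src/mathUtils.py | generate_multinomial_terms
-- ===== SOURCE A (Python) =====
-- def generate_multinomial_terms(number_of_variables, degree):
--     terms = [[]]
--     final_terms = []
--
--     i = 0
--     while i < number_of_variables:
--         new_terms = []
--
--         j = 0
--         while j < len(terms):
--             term = terms[j]
--             term_sum = sum(term)
--
--             k = 0
--             while k <= degree:
--                 current_term_sum = term_sum + k
--
--                 if current_term_sum <= degree: # filter out combinations > degree
--                     new_term = term.copy()
--                     new_term.append(k)
--
--                     if i + 1 == number_of_variables and current_term_sum == degree: # found a term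
--                         final_terms.append(new_term)
--                     else:
--                         new_terms.append(new_term) # build upon this term
--
--                 k += 1
--
--             j += 1
--
--         terms = new_terms
--         i += 1
--
--     return final_terms
-- ===== SOURCE B (Python) =====
-- def generate_multinomial_terms(number_of_variables, degree):
--     # depth-first recursion on the number of remaining variables
--     if number_of_variables <= 0 or degree < 0:
--         return []
--
--     def rec(vars_left, remaining):
--         if vars_left == 1:
--             return [[remaining]]
--         return [[k] + rest
--                 for k in range(remaining + 1)
--                 for rest in rec(vars_left - 1, remaining - k)]
--
--     return rec(number_of_variables, degree)
-- ===== Notes on version B (the rewrite author's own statement) =====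
-- stated objective: simpler
-- what changed: Replaces A's iterative level-wise expansion (maintaining and filtering all partial prefix tuples, recomputing each prefix sum) with a direct depth-first recursion on the number of variables that emits each exponent tuple front-to-back.
import Mathlib
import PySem

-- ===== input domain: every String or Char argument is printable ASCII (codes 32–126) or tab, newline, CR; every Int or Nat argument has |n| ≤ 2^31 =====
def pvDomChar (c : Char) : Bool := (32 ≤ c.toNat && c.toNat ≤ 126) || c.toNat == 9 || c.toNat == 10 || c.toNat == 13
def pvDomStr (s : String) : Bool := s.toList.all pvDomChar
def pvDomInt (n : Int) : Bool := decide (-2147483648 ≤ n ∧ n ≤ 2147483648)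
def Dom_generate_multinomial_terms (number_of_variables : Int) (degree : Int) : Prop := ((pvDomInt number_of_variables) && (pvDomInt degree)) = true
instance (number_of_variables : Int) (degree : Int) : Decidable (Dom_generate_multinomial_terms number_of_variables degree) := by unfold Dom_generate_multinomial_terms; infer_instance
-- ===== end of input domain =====

-- B replaces A's iterative level-wise prefix expansion with a depth-first recursion
-- on the number of variables (objective: simpler).

-- ===== PORT A =====
-- inner k-loop body: while k <= degree, acc = (new_terms, final_terms)
def pvA_kstep (nvars degree i : Int) (term : List Int) (term_sum : Int)
    (acc : List (List Int) × List (List Int)) (k : Int) : List (List Int) × List (List Int) :=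
  let s := term_sum + k
  if s ≤ degree then
    let new_term := term ++ [k]
    if i + 1 = nvars ∧ s = degree then (acc.1, acc.2 ++ [new_term])
    else (acc.1 ++ [new_term], acc.2)
  else acc

-- j-loop body: one term processed through the whole k-loop
def pvA_jstep (nvars degree i : Int) (acc : List (List Int) × List (List Int))
    (term : List Int) : List (List Int) × List (List Int) :=
  (PySem.List.pyRange 0 (degree + 1) 1).foldl (pvA_kstep nvars degree i term term.sum) acc

-- outer while i < number_of_variables loop; fuel = number of iterations
def pvA_iloop (nvars degree : Int) : Nat → Int → List (List Int) → List (List Int) → List (List Int)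
  | 0, _, _, finals => finals
  | (fuel+1), i, terms, finals =>
    let res := terms.foldl (pvA_jstep nvars degree i) ([], finals)
    pvA_iloop nvars degree fuel (i + 1) res.1 res.2

def generate_multinomial_terms (number_of_variables : Int) (degree : Int) : List (List Int) :=
  pvA_iloop number_of_variables degree number_of_variables.toNat 0 [[]] []

-- ===== PORT B =====
-- rec(vars_left, remaining); vars_left ≥ 1 at every call
def pvB_rec : Nat → Int → List (List Int)
  | 0, _ => []  -- unreachable: rec is only called with vars_left ≥ 1
  | 1, r => [[r]]
  | (v+2), r =>
      (PySem.List.pyRange 0 (r + 1) 1).flatMap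
        (fun k => (pvB_rec (v+1) (r - k)).map (fun rest => k :: rest))

def generate_multinomial_terms_alt (number_of_variables : Int) (degree : Int) : List (List Int) :=
  if number_of_variables ≤ 0 ∨ degree < 0 then []
  else pvB_rec number_of_variables.toNat degree

-- ===== PRECONDITION & SPEC =====
def Spec_generate_multinomial_terms (number_of_variables : Int) (degree : Int) (out : List (List Int)) : Prop := out = generate_multinomial_terms_alt number_of_variables degree
instance (number_of_variables : Int) (degree : Int) (out : List (List Int)) : Decidable (Spec_generate_multinomial_terms number_of_variables degree out) := by unfold Spec_generate_multinomial_terms; infer_instance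

-- ===== CLAIM (what is proved, stated in full; the proofs are below) =====
def Claim_equal_generate_multinomial_terms : Prop := ∀ (number_of_variables : Int) (degree : Int), Dom_generate_multinomial_terms number_of_variables degree → Spec_generate_multinomial_terms number_of_variables degree (generate_multinomial_terms number_of_variables degree)

-- ===== LEMMAS AND PROOFS =====

-- filtering a range by an upper bound is a shorter range
lemma pyRange_filter_le (b r : Int) (hrb : r < b) : ∀ (n : Nat) (a : Int), (b - a).toNat = n →
    (PySem.List.pyRange a b 1).filter (fun k => decide (k ≤ r)) = PySem.List.pyRange a (r + 1) 1 := by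
  intro n
  induction n with
  | zero =>
    intro a h
    rw [PySem.List.pyRange_one_eq_nil (a := a) (b := b) (by omega),
      PySem.List.pyRange_one_eq_nil (a := a) (b := r + 1) (by omega)]
    rfl
  | succ n ih =>
    intro a h
    rw [PySem.List.pyRange_one_cons (by omega : a < b)]
    by_cases hk : a ≤ r
    · rw [List.filter_cons_of_pos (by simpa using hk), ih (a+1) (by omega)]
      exact (PySem.List.pyRange_one_cons (by omega)).symm
    · rw [List.filter_cons_of_neg (by simpa using hk), ih (a+1) (by omega),
        PySem.List.pyRange_one_eq_nil (a := a + 1) (b := r + 1) (by omega),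
        PySem.List.pyRange_one_eq_nil (a := a) (b := r + 1) (by omega)]

-- filtering a range by equality keeps at most the one element
lemma pyRange_filter_eq (b x : Int) : ∀ (n : Nat) (a : Int), (b - a).toNat = n →
    (PySem.List.pyRange a b 1).filter (fun k => decide (k = x))
      = if a ≤ x ∧ x < b then [x] else [] := by
  intro n
  induction n with
  | zero =>
    intro a h
    rw [PySem.List.pyRange_one_eq_nil (a := a) (b := b) (by omega),
      if_neg (show ¬ (a ≤ x ∧ x < b) by omega)]
    rfl
  | succ n ih =>
    intro a h
    rw [PySem.List.pyRange_one_cons (by omega : a < b)]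
    by_cases hax : a = x
    · subst hax
      rw [List.filter_cons_of_pos (by simp), ih (a+1) (by omega),
        if_neg (show ¬ (a + 1 ≤ a ∧ a < b) by omega), if_pos (show a ≤ a ∧ a < b by omega)]
    · rw [List.filter_cons_of_neg (by simpa using hax), ih (a+1) (by omega)]
      by_cases hx : a + 1 ≤ x ∧ x < b
      · rw [if_pos hx, if_pos (show a ≤ x ∧ x < b by omega)]
      · rw [if_neg hx, if_neg (show ¬ (a ≤ x ∧ x < b) by omega)]

-- on a non-final outer iteration the k-loop only extends new_terms
lemma foldl_kstep_notlast (nvars degree i : Int) (term : List Int) (ts : Int)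
    (h : ¬ (i + 1 = nvars)) : ∀ (l : List Int) (acc : List (List Int) × List (List Int)),
    l.foldl (pvA_kstep nvars degree i term ts) acc
      = (l.foldl (fun a k => if ts + k ≤ degree then a ++ [term ++ [k]] else a) acc.1, acc.2) := by
  intro l
  induction l with
  | nil => intro acc; rfl
  | cons k l ih =>
    intro acc
    have hne : ¬ (i + 1 = nvars ∧ ts + k = degree) := fun hc => h hc.1
    by_cases hle : ts + k ≤ degree
    · simp only [List.foldl_cons, pvA_kstep, if_pos hle]
      rw [if_neg hne]
      exact ih _
    · simp only [List.foldl_cons, pvA_kstep, if_neg hle]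
      exact ih _

-- on the final outer iteration only final_terms matters
lemma foldl_kstep_last_snd (nvars degree i : Int) (term : List Int) (ts : Int)
    (h : i + 1 = nvars) : ∀ (l : List Int) (acc : List (List Int) × List (List Int)),
    (l.foldl (pvA_kstep nvars degree i term ts) acc).2
      = l.foldl (fun a k => if ts + k = degree then a ++ [term ++ [k]] else a) acc.2 := by
  intro l
  induction l with
  | nil => intro acc; rfl
  | cons k l ih =>
    intro acc
    by_cases heq : ts + k = degree
    · have hc : i + 1 = nvars ∧ ts + k = degree := ⟨h, heq⟩
      simp only [List.foldl_cons, pvA_kstep, if_pos (le_of_eq heq), if_pos heq]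
      rw [if_pos hc]
      exact ih _
    · have hne : ¬ (i + 1 = nvars ∧ ts + k = degree) := fun hc => heq hc.2
      by_cases hle : ts + k ≤ degree
      · simp only [List.foldl_cons, pvA_kstep, if_pos hle, if_neg heq]
        rw [if_neg hne]
        exact ih _
      · simp only [List.foldl_cons, pvA_kstep, if_neg hle, if_neg heq]
        exact ih _

-- one non-final iteration over all terms = flatMap of range extensions
lemma jfold_notlast (nvars degree i : Int) (h : ¬ (i + 1 = nvars)) :
    ∀ (T : List (List Int)) (acc : List (List Int) × List (List Int)),
    (∀ p ∈ T, 0 ≤ p.sum) →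
    T.foldl (pvA_jstep nvars degree i) acc
      = (acc.1 ++ T.flatMap (fun p =>
          (PySem.List.pyRange 0 (degree - p.sum + 1) 1).map (fun k => p ++ [k])), acc.2) := by
  intro T
  induction T with
  | nil => intro acc _; simp
  | cons p T ih =>
    intro acc hT
    have hp : 0 ≤ p.sum := hT p (by simp)
    have hstep : pvA_jstep nvars degree i acc p
        = (acc.1 ++ (PySem.List.pyRange 0 (degree - p.sum + 1) 1).map (fun k => p ++ [k]), acc.2) := by
      rw [pvA_jstep, foldl_kstep_notlast nvars degree i p p.sum h]
      rw [PySem.List.foldl_append_ite (fun k => p.sum + k ≤ degree) (fun k => p ++ [k])]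
      rw [List.filter_congr (l := PySem.List.pyRange 0 (degree + 1) 1)
        (q := fun k => decide (k ≤ degree - p.sum)) (by intro k _; simp only [decide_eq_decide]; omega)]
      rw [pyRange_filter_le (degree + 1) (degree - p.sum) (by omega) (degree + 1 - 0).toNat 0 rfl]
    rw [List.foldl_cons, hstep, ih _ (fun q hq => hT q (by simp [hq]))]
    simp

-- the final iteration appends exactly one completed term per surviving prefix
lemma jfold_last_snd (nvars degree i : Int) (h : i + 1 = nvars) :
    ∀ (T : List (List Int)) (acc : List (List Int) × List (List Int)),
    (∀ p ∈ T, 0 ≤ p.sum ∧ p.sum ≤ degree) →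
    (T.foldl (pvA_jstep nvars degree i) acc).2
      = acc.2 ++ T.map (fun p => p ++ [degree - p.sum]) := by
  intro T
  induction T with
  | nil => intro acc _; simp
  | cons p T ih =>
    intro acc hT
    obtain ⟨hp0, hpd⟩ := hT p (by simp)
    have hstep : (pvA_jstep nvars degree i acc p).2 = acc.2 ++ [p ++ [degree - p.sum]] := by
      rw [pvA_jstep, foldl_kstep_last_snd nvars degree i p p.sum h]
      rw [PySem.List.foldl_append_ite (fun k => p.sum + k = degree) (fun k => p ++ [k])]
      rw [List.filter_congr (l := PySem.List.pyRange 0 (degree + 1) 1)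
        (q := fun k => decide (k = degree - p.sum)) (by intro k _; simp only [decide_eq_decide]; omega)]
      rw [pyRange_filter_eq (degree + 1) (degree - p.sum) (degree + 1 - 0).toNat 0 rfl,
        if_pos (by omega)]
      simp
    rw [List.foldl_cons]
    have h2 := ih (pvA_jstep nvars degree i acc p) (fun q hq => hT q (by simp [hq]))
    rw [h2, hstep]
    simp

-- with no pending terms the remaining iterations change nothing
lemma iloop_nil (nvars degree : Int) : ∀ (f : Nat) (i : Int) (F : List (List Int)),
    pvA_iloop nvars degree f i [] F = F := by
  intro f
  induction f with
  | zero => intro i F; rfl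
  | succ f ih => intro i F; simp [pvA_iloop, ih]

-- main invariant: running the last m+1 iterations from prefix set T equals
-- B's depth-first enumeration appended below each prefix
lemma iloop_inv (nvars degree : Int) : ∀ (m : Nat) (i : Int) (T F : List (List Int)),
    i + ((m : Int) + 1) = nvars → (∀ p ∈ T, 0 ≤ p.sum ∧ p.sum ≤ degree) →
    pvA_iloop nvars degree (m + 1) i T F
      = F ++ T.flatMap (fun p => (pvB_rec (m + 1) (degree - p.sum)).map (fun t => p ++ t)) := by
  intro m
  induction m with
  | zero =>
    intro i T F hi hT
    show (T.foldl (pvA_jstep nvars degree i) ([], F)).2 = _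
    rw [jfold_last_snd nvars degree i (by omega) T ([], F) hT]
    congr 1
    have h1 : (fun p : List Int => (pvB_rec (0 + 1) (degree - p.sum)).map (fun t => p ++ t))
        = fun p : List Int => [p ++ [degree - p.sum]] := rfl
    rw [h1, ← List.flatMap_map (fun p : List Int => p ++ [degree - p.sum]) (fun x => [x]) T,
      List.flatMap_singleton']
  | succ m ih =>
    intro i T F hi hT
    have hnl : ¬ (i + 1 = nvars) := by omega
    show pvA_iloop nvars degree (m + 1) (i + 1)
        (T.foldl (pvA_jstep nvars degree i) ([], F)).1
        (T.foldl (pvA_jstep nvars degree i) ([], F)).2 = _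
    rw [jfold_notlast nvars degree i hnl T ([], F) (fun p hp => (hT p hp).1)]
    dsimp only
    have hT' : ∀ p' ∈ T.flatMap (fun p =>
        (PySem.List.pyRange 0 (degree - p.sum + 1) 1).map (fun k => p ++ [k])),
        0 ≤ p'.sum ∧ p'.sum ≤ degree := by
      intro p' hp'
      rw [List.mem_flatMap] at hp'
      obtain ⟨p, hp, hmem⟩ := hp'
      rw [List.mem_map] at hmem
      obtain ⟨k, hk, rfl⟩ := hmem
      rw [PySem.List.mem_pyRange_one] at hk
      obtain ⟨hp0, hpd⟩ := hT p hp
      simp only [List.sum_append, List.sum_cons, List.sum_nil]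
      omega
    rw [List.nil_append, ih (i + 1) _ F (by omega) hT']
    congr 1
    rw [List.flatMap_assoc]
    congr 1
    funext p
    rw [List.flatMap_map]
    show _ = (pvB_rec (m + 2) (degree - p.sum)).map (fun t => p ++ t)
    rw [show pvB_rec (m + 2) (degree - p.sum)
        = (PySem.List.pyRange 0 (degree - p.sum + 1) 1).flatMap
            (fun k => (pvB_rec (m + 1) (degree - p.sum - k)).map (fun rest => k :: rest)) from rfl,
      List.map_flatMap]
    congr 1
    funext k
    have hsum : (p ++ [k]).sum = p.sum + k := by simp
    rw [hsum, sub_add_eq_sub_sub]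
    simp [List.map_map, Function.comp, List.append_assoc]

-- ===== VERDICT (by name: the statement is the Claim_ definition above) =====
theorem generate_multinomial_terms_spec : Claim_equal_generate_multinomial_terms := by
  unfold Claim_equal_generate_multinomial_terms Spec_generate_multinomial_terms
  intro n d _
  unfold generate_multinomial_terms generate_multinomial_terms_alt
  by_cases hn : n ≤ 0
  · have h0 : n.toNat = 0 := by omega
    rw [h0, if_pos (Or.inl hn)]
    rfl
  · obtain ⟨m, hm⟩ : ∃ m, n.toNat = m + 1 := ⟨n.toNat - 1, by omega⟩
    by_cases hd : d < 0
    · -- first iteration empties the term list: the k-range is empty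
      rw [hm, if_pos (Or.inr hd)]
      have hrange : PySem.List.pyRange 0 (d + 1) 1 = [] :=
        PySem.List.pyRange_one_eq_nil (by omega)
      show pvA_iloop n d m (0 + 1)
          ([[]].foldl (pvA_jstep n d 0) ([], [])).1
          ([[]].foldl (pvA_jstep n d 0) ([], [])).2 = []
      have hfold : [([] : List Int)].foldl (pvA_jstep n d 0) ([], []) = ([], []) := by
        simp [pvA_jstep, hrange]
      rw [hfold]
      exact iloop_nil n d m 1 []
    · rw [hm, if_neg (show ¬ (n ≤ 0 ∨ d < 0) by omega),
        iloop_inv n d m 0 [[]] [] (by omega)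
          (by intro p hp; simp only [List.mem_singleton] at hp; subst hp
              simp only [List.sum_nil]; omega)]
      simp
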